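-- pv_equiv track=rewrite | github.com/Abhishek-IOT/Data_Structures | DATA_STRUCTURES/DSA Questions/Strings/romantodecimal.py | convert
-- ===== SOURCE A (Python) =====
-- def convert(s,d):
--     t=0
--     for i in range(len(s)):
--         s=s+" "
--         if s[i]=='I' and s[i+1]=='X':
--             return 9
--         if s[i]=='I' and s[i+1]=='V':
--             return 4
--         elif s[i] in d:
--             t = t + d[s[i]]
--     return t
-- ===== SOURCE B (Python) =====
-- def convert(s, d):
--     ix = s.find('IX')
--     iv = s.find('IV')
--     if ix >= 0 and (iv < 0 or ix < iv):
--         return 9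
--     if iv >= 0:
--         return 4
--     return sum(d[c] for c in s if c in d)
-- ===== Notes on version B (the rewrite author's own statement) =====
-- stated objective: faster
-- what changed: Replaces A's interleaved accumulate-while-checking index loop over a string that grows a space per iteration with a two-phase decomposition: str.find locates the leftmost 'IX'/'IV' (return 9/4 by whichever is first), otherwise a single comprehension sums the mapped characters; A's per-iteration s = s + ' ' copying is gone.
import Mathlib
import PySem

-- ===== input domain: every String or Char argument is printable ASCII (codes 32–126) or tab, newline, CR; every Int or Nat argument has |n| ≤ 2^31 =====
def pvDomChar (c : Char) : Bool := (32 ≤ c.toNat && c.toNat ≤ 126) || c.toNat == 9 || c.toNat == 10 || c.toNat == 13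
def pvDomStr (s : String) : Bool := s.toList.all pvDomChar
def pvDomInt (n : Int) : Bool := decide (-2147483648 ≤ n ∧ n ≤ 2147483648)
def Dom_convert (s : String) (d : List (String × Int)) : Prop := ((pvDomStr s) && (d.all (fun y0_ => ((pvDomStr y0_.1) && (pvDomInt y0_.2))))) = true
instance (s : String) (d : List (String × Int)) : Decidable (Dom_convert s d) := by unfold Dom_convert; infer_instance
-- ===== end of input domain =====

-- B replaces A's interleaved accumulate-while-checking index loop (over a string that grows a
-- space each iteration) by a two-phase decomposition: substring search for the leftmost 'IX'/'IV',
-- otherwise one comprehension sum (idiomatic; equivalence is about the return value — A only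
-- rebinds its local s, so no caller-visible mutation).

-- ===== PORT A =====
-- A's loop: s grows by one space per iteration, then s[i] and s[i+1] are read; both indices are
-- always in range there, so pyGetD (any default) is exact; 'fuel' = remaining iterations of
-- range(len(s)); 's[i] in d' / 'd[s[i]]' = first-match lookup of the 1-char key.
def convertGo (d : List (String × Int)) : Nat → Nat → List Char → Int → Int
  | 0, _, _, t => t
  | fuel+1, i, s, t =>
    let s' := s ++ [' ']
    let c  := PySem.List.pyGetD s' (i : Int) ' '
    let c2 := PySem.List.pyGetD s' ((i : Int) + 1) ' '
    if c = 'I' ∧ c2 = 'X' then 9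
    else if c = 'I' ∧ c2 = 'V' then 4
    else
      let t' := match List.lookup (String.ofList [c]) d with
        | some v => t + v
        | none => t
      convertGo d fuel (i+1) s' t'

def convert (s : String) (d : List (String × Int)) : Int :=
  convertGo d s.toList.length 0 s.toList 0

-- ===== PORT B =====
def convert_alt (s : String) (d : List (String × Int)) : Int :=
  let cs := s.toList
  let ix := PySem.Chars.find cs ['I', 'X']
  let iv := PySem.Chars.find cs ['I', 'V']
  if 0 ≤ ix ∧ (iv < 0 ∨ ix < iv) then 9
  else if 0 ≤ iv then 4
  else ((cs.filter (fun c => (List.lookup (String.ofList [c]) d).isSome)).map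
          (fun c => (List.lookup (String.ofList [c]) d).getD 0)).sum

-- ===== PRECONDITION & SPEC =====
def Spec_convert (s : String) (d : List (String × Int)) (out : Int) : Prop := out = convert_alt s d
instance (s : String) (d : List (String × Int)) (out : Int) : Decidable (Spec_convert s d out) := by unfold Spec_convert; infer_instance

-- ===== CLAIM (what is proved, stated in full; the proofs are below) =====
def Claim_equal_convert : Prop := ∀ (s : String) (d : List (String × Int)), Dom_convert s d → Spec_convert s d (convert s d)

-- ===== LEMMAS AND PROOFS =====

-- weight of one character under d (0 when its 1-char key is absent)
def pvW (d : List (String × Int)) (c : Char) : Int := (List.lookup (String.ofList [c]) d).getD 0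

-- A's loop as a pure structural scan with a one-character lookahead
def pvScan (d : List (String × Int)) : List Char → Int → Int
  | [], t => t
  | c :: rest, t =>
    if c = 'I' ∧ rest.head? = some 'X' then 9
    else if c = 'I' ∧ rest.head? = some 'V' then 4
    else pvScan d rest (t + pvW d c)

-- first occurrence of a nonempty pattern in a cons, from PySem's find specification
theorem find_cons (c : Char) (cs sub : List Char) (hne : sub ≠ []) :
    PySem.Chars.find (c :: cs) sub =
      if sub <+: (c :: cs) then 0
      else if PySem.Chars.find cs sub = -1 then -1 else PySem.Chars.find cs sub + 1 := by
  have _ := hne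
  have hinf : sub <:+: (c :: cs) ↔ sub <+: (c :: cs) ∨ sub <:+: cs := by
    constructor
    · rintro ⟨p, q, hpq⟩
      cases p with
      | nil => left; exact ⟨q, by simpa using hpq⟩
      | cons a p' =>
        right
        cases hpq
        exact ⟨p', q, rfl⟩
    · rintro (⟨q, hq⟩ | hi)
      · exact ⟨[], q, by simpa using hq⟩
      · exact hi.trans (List.suffix_cons c cs).isInfix
  by_cases hp : sub <+: (c :: cs)
  · simp only [hp, if_true]
    have h0 : 0 ≤ PySem.Chars.find (c :: cs) sub := by
      rw [PySem.Chars.find_nonneg_iff]; exact hinf.mpr (Or.inl hp)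
    obtain ⟨h1, h2⟩ := PySem.Chars.find_spec (s := c :: cs) (sub := sub) h0
    by_contra hne0
    have : 0 < (PySem.Chars.find (c :: cs) sub).toNat := by omega
    exact h2 0 this (by simpa using hp)
  · simp only [hp, if_false]
    by_cases hcs : PySem.Chars.find cs sub = -1
    · simp only [hcs, if_true]
      rw [PySem.Chars.find_eq_neg_one_iff] at hcs ⊢
      rw [hinf]; tauto
    · simp only [hcs, if_false]
      have h0' : 0 ≤ PySem.Chars.find cs sub := by
        have := PySem.Chars.neg_one_le_find (s := cs) (sub := sub); omega
      obtain ⟨hb1, hb2⟩ := PySem.Chars.find_spec (s := cs) (sub := sub) h0'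
      have h0 : 0 ≤ PySem.Chars.find (c :: cs) sub := by
        rw [PySem.Chars.find_nonneg_iff]
        rw [PySem.Chars.find_nonneg_iff] at h0'
        exact hinf.mpr (Or.inr h0')
      obtain ⟨ha1, ha2⟩ := PySem.Chars.find_spec (s := c :: cs) (sub := sub) h0
      set m := (PySem.Chars.find (c :: cs) sub).toNat with hm
      set k := (PySem.Chars.find cs sub).toNat with hk
      have hmne : m ≠ 0 := by
        intro h; rw [h] at ha1; simp at ha1; exact hp ha1
      have hms : m = (m - 1) + 1 := (Nat.succ_pred_eq_of_pos (Nat.pos_of_ne_zero hmne)).symm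
      have hdrop : sub <+: cs.drop (m - 1) := by
        rw [hms, List.drop_succ_cons] at ha1; exact ha1
      have hkm : k ≤ m - 1 := by
        by_contra h
        exact hb2 (m-1) (by omega) hdrop
      have hmk : m ≤ k + 1 := by
        by_contra h
        exact ha2 (k+1) (by omega) (by simpa using hb1)
      have : m = k + 1 := by omega
      omega

theorem prefix_two_iff (a b c : Char) (cs : List Char) :
    ([a, b] <+: (c :: cs)) ↔ c = a ∧ cs.head? = some b := by
  constructor
  · rintro ⟨t, ht⟩
    cases cs with
    | nil => simp at ht
    | cons e r => simp at ht; simp [ht.1.symm, ht.2.1.symm]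
  · rintro ⟨rfl, h2⟩
    cases cs with
    | nil => simp at h2
    | cons e r => simp_all

theorem find_nil_of_ne (sub : List Char) (h : sub ≠ []) : PySem.Chars.find [] sub = -1 := by
  rw [PySem.Chars.find_eq_neg_one_iff]
  simp [List.infix_nil, h]

-- the scan equals B's detect-then-sum form
theorem pvScan_eq (d : List (String × Int)) (cs : List Char) (t : Int) :
    pvScan d cs t =
      if 0 ≤ PySem.Chars.find cs ['I','X'] ∧
         (PySem.Chars.find cs ['I','V'] < 0 ∨
           PySem.Chars.find cs ['I','X'] < PySem.Chars.find cs ['I','V']) then 9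
      else if 0 ≤ PySem.Chars.find cs ['I','V'] then 4
      else t + (cs.map (pvW d)).sum := by
  induction cs generalizing t with
  | nil =>
      rw [find_nil_of_ne _ (by simp), find_nil_of_ne _ (by simp)]
      simp [pvScan]
  | cons c rest ih =>
      rw [find_cons c rest ['I','X'] (by simp), find_cons c rest ['I','V'] (by simp)]
      simp only [prefix_two_iff]
      have hX1 := PySem.Chars.neg_one_le_find (s := rest) (sub := ['I','X'])
      have hV1 := PySem.Chars.neg_one_le_find (s := rest) (sub := ['I','V'])
      by_cases hX : c = 'I' ∧ rest.head? = some 'X'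
      · simp only [pvScan, hX.1, hX.2]
        simp
        split_ifs <;> first | rfl | omega | (intro h; first | exact h.elim | omega)
      · by_cases hV : c = 'I' ∧ rest.head? = some 'V'
        · simp only [pvScan, hV.1, hV.2]
          simp
        · simp only [pvScan]
          rw [if_neg hX, if_neg hV, ih]
          simp only [hX, hV, if_false, List.map_cons, List.sum_cons]
          split_ifs <;> first | rfl | omega | (intro h; first | exact h.elim | omega)

-- A's indexed loop over the growing string is the pure scan of the remaining suffix
theorem convertGo_eq (d : List (String × Int)) (rest pre : List Char) (t : Int) :
    convertGo d rest.length pre.length ((pre ++ rest) ++ List.replicate pre.length ' ') t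
      = pvScan d rest t := by
  induction rest generalizing pre t with
  | nil => simp [convertGo, pvScan]
  | cons c r ih =>
      have hc : PySem.List.pyGetD ((((pre ++ (c :: r)) ++ List.replicate pre.length ' ') ++ [' '])) ((pre.length : Nat) : Int) ' ' = c := by
        rw [PySem.List.pyGetD_natCast]
        simp [List.getD, List.getElem?_append_right, List.append_assoc]
      have hc2 : PySem.List.pyGetD ((((pre ++ (c :: r)) ++ List.replicate pre.length ' ') ++ [' '])) (((pre.length : Nat) : Int) + 1) ' '
          = r.head?.getD ' ' := by
        have : (((pre.length : Nat) : Int) + 1) = (((pre.length + 1 : Nat)) : Int) := by push_cast; ring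
        rw [this, PySem.List.pyGetD_natCast]
        cases r with
        | nil =>
            simp [List.getD, List.getElem?_append_right, List.append_assoc]
            have : List.replicate pre.length ' ' ++ [' '] = List.replicate (pre.length + 1) ' ' :=
              (List.replicate_succ' ..).symm
            simp [this]
        | cons b rr => simp [List.getD, List.getElem?_append_right, List.append_assoc]
      simp only [List.length_cons, convertGo, hc, hc2]
      have hshape : (((pre ++ (c :: r)) ++ List.replicate pre.length ' ') ++ [' '])
          = ((pre ++ [c]) ++ r) ++ List.replicate (pre ++ [c]).length ' ' := by
        simp [List.replicate_succ' , List.append_assoc]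
      by_cases h1 : c = 'I' ∧ r.head?.getD ' ' = 'X'
      · have : c = 'I' ∧ r.head? = some 'X' := by
          rcases r with _ | ⟨b, rr⟩
          · simp at h1
          · simpa using h1
        simp [pvScan, h1, this]
      · by_cases h2 : c = 'I' ∧ r.head?.getD ' ' = 'V'
        · have : c = 'I' ∧ r.head? = some 'V' := by
            rcases r with _ | ⟨b, rr⟩
            · simp at h2
            · simpa using h2
          simp [pvScan, h1, h2, this]
        · have h1' : ¬ (c = 'I' ∧ r.head? = some 'X') := by
            rcases r with _ | ⟨b, rr⟩ <;> simp_all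
          have h2' : ¬ (c = 'I' ∧ r.head? = some 'V') := by
            rcases r with _ | ⟨b, rr⟩ <;> simp_all
          rw [if_neg h1, if_neg h2]
          simp only [pvScan]
          rw [if_neg h1', if_neg h2']
          have harg : (match List.lookup (String.ofList [c]) d with
              | some v => t + v
              | none => t) = t + pvW d c := by
            cases h : List.lookup (String.ofList [c]) d <;> simp [pvW, h]
          rw [hshape, harg]
          have := ih (pre ++ [c]) (t + pvW d c)
          simpa using this

-- B's filtered comprehension sum is the total weight sum
theorem wsum_eq (d : List (String × Int)) (cs : List Char) :
    ((cs.filter (fun c => (List.lookup (String.ofList [c]) d).isSome)).map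
        (fun c => (List.lookup (String.ofList [c]) d).getD 0)).sum
      = (cs.map (pvW d)).sum := by
  induction cs with
  | nil => simp
  | cons c r ih =>
      cases h : List.lookup (String.ofList [c]) d <;>
        simp [List.filter_cons, h, ih, pvW]

-- ===== VERDICT (by name: the statement is the Claim_ definition above) =====
theorem convert_spec : Claim_equal_convert := by
  intro s d _
  unfold Spec_convert
  have h0 := convertGo_eq d s.toList [] 0
  simp only [List.nil_append, List.length_nil, List.replicate_zero, List.append_nil] at h0
  rw [convert, h0, pvScan_eq, convert_alt]
  simp only [wsum_eq, zero_add]
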